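-- pv_equiv track=rewrite | github.com/m-anggi21/voices_asisstant_depo78_v1 | modules/nlp_core.py | find_all_keys_for_varian
-- ===== SOURCE A (Python) =====
-- def find_all_keys_for_varian(category, varian, catalog):
--     """
--     Ambil semua produk dengan varian tertentu.
--     Jika pakai kategori tapi tidak ketemu, fallback abaikan kategori.
--     """
--     results = []
--     for k, meta in catalog.items():
--         if (meta.get("varian") or "").lower() == (varian or "").lower() and (not category or meta.get("kategori") == category):
--             results.append(k)
--
--     if not results and category:
--         for k, meta in catalog.items():
--             if (meta.get("varian") or "").lower() == (varian or "").lower():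
--                 results.append(k)
--     return results
-- ===== SOURCE B (Python) =====
-- def find_all_keys_for_varian(category, varian, catalog):
--     target = (varian or "").lower()
--     all_varian = []
--     with_category = []
--     for k, meta in catalog.items():
--         if (meta.get("varian") or "").lower() == target:
--             all_varian.append(k)
--             if meta.get("kategori") == category:
--                 with_category.append(k)
--     if not category:
--         return all_varian
--     return with_category if with_category else all_varian
-- ===== Notes on version B (the rewrite author's own statement) =====
-- stated objective: faster
-- what changed: Single pass co-accumulating the full varian-match list and the category-restricted list (with the varian target lowered once), replacing A's filter pass plus a second full fallback scan.
import Mathlib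
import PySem

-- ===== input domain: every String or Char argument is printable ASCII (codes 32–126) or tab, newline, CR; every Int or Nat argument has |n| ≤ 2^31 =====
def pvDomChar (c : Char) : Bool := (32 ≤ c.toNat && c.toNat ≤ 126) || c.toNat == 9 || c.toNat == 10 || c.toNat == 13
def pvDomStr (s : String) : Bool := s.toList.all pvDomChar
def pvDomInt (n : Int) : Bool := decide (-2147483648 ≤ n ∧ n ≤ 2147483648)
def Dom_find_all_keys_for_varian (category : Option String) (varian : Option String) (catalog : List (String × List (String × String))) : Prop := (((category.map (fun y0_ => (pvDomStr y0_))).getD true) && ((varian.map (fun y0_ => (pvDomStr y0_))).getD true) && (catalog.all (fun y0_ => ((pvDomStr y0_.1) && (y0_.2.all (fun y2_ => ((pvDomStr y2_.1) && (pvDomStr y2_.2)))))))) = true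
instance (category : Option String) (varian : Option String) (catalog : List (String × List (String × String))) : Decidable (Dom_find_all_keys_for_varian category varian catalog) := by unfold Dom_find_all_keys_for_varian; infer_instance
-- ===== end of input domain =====

-- B merges A's filter scan and its category-fallback rescan into one pass that co-accumulates
-- both candidate lists (constant-factor speedup; return value identical).

-- (meta.get("varian") or "")  — first-match lookup, None and "" both collapse to ""
def pvMetaGetOr (m : List (String × String)) (key : String) : String :=
  (List.lookup key m).getD ""

-- Python truthiness of the optional category string: falsy iff None or ""
def pvCatFalsy (category : Option String) : Bool :=
  category == none || category == some ""

-- ===== PORT A =====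
def find_all_keys_for_varian (category : Option String) (varian : Option String) (catalog : List (String × List (String × String))) : List String :=
  let results := catalog.foldl (fun results kv =>
    if PySem.Str.lower (pvMetaGetOr kv.2 "varian") == PySem.Str.lower (varian.getD "")
        && (pvCatFalsy category || (List.lookup "kategori" kv.2 == category)) then
      results ++ [kv.1]
    else results) []
  if results.isEmpty && !pvCatFalsy category then
    catalog.foldl (fun results kv =>
      if PySem.Str.lower (pvMetaGetOr kv.2 "varian") == PySem.Str.lower (varian.getD "") then
        results ++ [kv.1]
      else results) results
  else results

-- ===== PORT B =====
def find_all_keys_for_varian_alt (category : Option String) (varian : Option String) (catalog : List (String × List (String × String))) : List String :=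
  let target := PySem.Str.lower (varian.getD "")
  let acc := catalog.foldl (fun (acc : List String × List String) kv =>
    if PySem.Str.lower (pvMetaGetOr kv.2 "varian") == target then
      (acc.1 ++ [kv.1],
        if List.lookup "kategori" kv.2 == category then acc.2 ++ [kv.1] else acc.2)
    else acc) ([], [])
  if pvCatFalsy category then acc.1
  else if !acc.2.isEmpty then acc.2 else acc.1

-- ===== PRECONDITION & SPEC =====
def Spec_find_all_keys_for_varian (category : Option String) (varian : Option String) (catalog : List (String × List (String × String))) (out : List String) : Prop := out = find_all_keys_for_varian_alt category varian catalog
instance (category : Option String) (varian : Option String) (catalog : List (String × List (String × String))) (out : List String) : Decidable (Spec_find_all_keys_for_varian category varian catalog out) := by unfold Spec_find_all_keys_for_varian; infer_instance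

-- ===== CLAIM (what is proved, stated in full; the proofs are below) =====
def Claim_equal_find_all_keys_for_varian : Prop := ∀ (category : Option String) (varian : Option String) (catalog : List (String × List (String × String))), Dom_find_all_keys_for_varian category varian catalog → Spec_find_all_keys_for_varian category varian catalog (find_all_keys_for_varian category varian catalog)

-- ===== LEMMAS AND PROOFS =====

-- ===== VERDICT (by name: the statement is the Claim_ definition above) =====
-- B's paired fold computes (A's unrestricted scan, A's category-restricted scan) simultaneously.
theorem pair_fold (category : Option String) (varian : Option String)
    (l : List (String × List (String × String))) (a1 a2 : List String) :
    l.foldl (fun (acc : List String × List String) kv =>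
      if PySem.Str.lower (pvMetaGetOr kv.2 "varian") == PySem.Str.lower (varian.getD "") then
        (acc.1 ++ [kv.1],
          if List.lookup "kategori" kv.2 == category then acc.2 ++ [kv.1] else acc.2)
      else acc) (a1, a2)
    = (l.foldl (fun results kv =>
        if PySem.Str.lower (pvMetaGetOr kv.2 "varian") == PySem.Str.lower (varian.getD "") then
          results ++ [kv.1]
        else results) a1,
       l.foldl (fun results kv =>
        if PySem.Str.lower (pvMetaGetOr kv.2 "varian") == PySem.Str.lower (varian.getD "")
            && (List.lookup "kategori" kv.2 == category) then
          results ++ [kv.1]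
        else results) a2) := by
  induction l generalizing a1 a2 with
  | nil => rfl
  | cons kv t ih =>
    by_cases h : (PySem.Str.lower (pvMetaGetOr kv.2 "varian") == PySem.Str.lower (varian.getD "")) = true <;>
      by_cases h2 : (List.lookup "kategori" kv.2 == category) = true <;>
      simp only [List.foldl_cons, h, h2, Bool.and_true,
        Bool.and_false, if_true, if_false, Bool.false_eq_true] <;>
      rw [ih]

theorem find_all_keys_for_varian_spec : Claim_equal_find_all_keys_for_varian := by
  intro category varian catalog _
  unfold Spec_find_all_keys_for_varian find_all_keys_for_varian find_all_keys_for_varian_alt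
  by_cases hf : pvCatFalsy category = true
  · simp only [hf, Bool.true_or, Bool.and_true, Bool.not_true, Bool.and_false,
      Bool.false_eq_true, if_false, if_true, pair_fold]
  · have hf' : pvCatFalsy category = false := by simpa using hf
    simp only [hf', Bool.false_or, Bool.not_false, Bool.and_true, Bool.false_eq_true,
      if_false, pair_fold]
    by_cases he : (catalog.foldl (fun results kv =>
        if PySem.Str.lower (pvMetaGetOr kv.2 "varian") == PySem.Str.lower (varian.getD "")
            && (List.lookup "kategori" kv.2 == category) then
          results ++ [kv.1]
        else results) []).isEmpty = true
    · rw [List.isEmpty_iff] at he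
      rw [he]
      simp
    · have he' : (catalog.foldl (fun results kv =>
          if PySem.Str.lower (pvMetaGetOr kv.2 "varian") == PySem.Str.lower (varian.getD "")
              && (List.lookup "kategori" kv.2 == category) then
            results ++ [kv.1]
          else results) []).isEmpty = false := by simpa using he
      rw [he']
      simp
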